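-- pv_equiv track=rewrite | github.com/yaoxiyu/QQTang | tools/project_guard/forbidden_paths_guard.py | find_violations
-- ===== SOURCE A (Python) =====
-- def normalize_path(value: str) -> str:
--     return value.strip().replace("\\", "/").lstrip("./")
--
-- def is_forbidden_path(path: str, forbidden_path: str) -> bool:
--     normalized_path = normalize_path(path)
--     normalized_forbidden = normalize_path(forbidden_path)
--     if normalized_forbidden.endswith("/"):
--         return normalized_path.startswith(normalized_forbidden)
--     return normalized_path == normalized_forbidden
--
-- def find_violations(changed_paths: list[str], forbidden_paths: list[str]) -> list[str]:
--     violations: list[str] = []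
--     for path in changed_paths:
--         for forbidden_path in forbidden_paths:
--             if is_forbidden_path(path, forbidden_path):
--                 violations.append(f"{path} matches {forbidden_path}")
--                 break
--     return violations
-- ===== SOURCE B (Python) =====
-- def normalize_path(value: str) -> str:
--     return value.strip().replace("\\", "/").lstrip("./")
--
-- def find_violations(changed_paths: list[str], forbidden_paths: list[str]) -> list[str]:
--     # Index forbidden paths once: exact-match keys and directory-prefix keys,
--     # each mapped to the smallest list index carrying that normalized form.
--     exact: dict[str, int] = {}
--     prefix: dict[str, int] = {}
--     for i, forbidden_path in enumerate(forbidden_paths):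
--         nf = normalize_path(forbidden_path)
--         if nf.endswith("/"):
--             prefix.setdefault(nf, i)
--         else:
--             exact.setdefault(nf, i)
--     violations: list[str] = []
--     for path in changed_paths:
--         np = normalize_path(path)
--         best = exact.get(np)
--         for j in range(len(np)):
--             if np[j] == "/":
--                 k = prefix.get(np[: j + 1])
--                 if k is not None and (best is None or k < best):
--                     best = k
--         if best is not None:
--             violations.append(f"{path} matches {forbidden_paths[best]}")
--     return violations
-- ===== Notes on version B (the rewrite author's own statement) =====
-- stated objective: faster
-- what changed: Instead of testing every (path, forbidden) pair, B builds two dicts over the forbidden list once (normalized exact keys and trailing-slash prefix keys, each mapped to its smallest index) and then answers each path by one exact lookup plus one lookup per '/'-ancestor of the normalized path, taking the minimal matching index.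
import Mathlib
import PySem

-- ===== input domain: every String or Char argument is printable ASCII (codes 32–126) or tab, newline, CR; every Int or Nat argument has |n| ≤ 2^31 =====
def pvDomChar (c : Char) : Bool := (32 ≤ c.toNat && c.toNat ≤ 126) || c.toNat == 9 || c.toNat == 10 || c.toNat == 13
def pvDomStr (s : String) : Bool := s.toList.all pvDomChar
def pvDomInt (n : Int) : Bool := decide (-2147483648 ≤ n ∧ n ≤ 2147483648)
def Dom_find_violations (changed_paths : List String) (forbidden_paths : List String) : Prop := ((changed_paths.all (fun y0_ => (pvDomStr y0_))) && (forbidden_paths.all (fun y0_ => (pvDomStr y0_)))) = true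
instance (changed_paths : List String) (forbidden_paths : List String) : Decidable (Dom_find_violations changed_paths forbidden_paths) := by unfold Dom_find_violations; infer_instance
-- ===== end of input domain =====

-- B indexes the forbidden list in two dicts (exact / trailing-slash prefix keys → smallest index)
-- and resolves each path by dict lookups on its '/'-ancestors instead of scanning all forbidden
-- paths per changed path; objective: faster (per-path work no longer scans the forbidden list).

-- ===== PORT A =====
-- shared module helper: value.strip().replace("\\", "/").lstrip("./");
-- lstrip("./") is ported by hand as dropWhile (c ∈ {'.', '/'}) — exact for Python's lstrip with a char set.
def normalize_path (value : String) : List Char :=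
  (PySem.Chars.replace (PySem.Chars.strip value.toList) ['\\'] ['/']).dropWhile
    (fun c => c == '.' || c == '/')

def is_forbidden_path (path : String) (forbidden_path : String) : Bool :=
  let normalized_path := normalize_path path
  let normalized_forbidden := normalize_path forbidden_path
  if PySem.Chars.endswith normalized_forbidden ['/'] then
    PySem.Chars.startswith normalized_path normalized_forbidden
  else normalized_path == normalized_forbidden

-- A's inner 'for forbidden_path in forbidden_paths: … break' — first match wins
def pvInnerA (path : String) : List String → Option String
  | [] => none
  | f :: rest => if is_forbidden_path path f then some f else pvInnerA path rest

def find_violations (changed_paths : List String) (forbidden_paths : List String) : List String :=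
  changed_paths.foldl (fun violations path =>
    match pvInnerA path forbidden_paths with
    | some f => violations ++ [path ++ " matches " ++ f]
    | none => violations) []

-- ===== PORT B =====
-- first loop of Source B: enumerate(forbidden_paths), setdefault into the prefix / exact dict
def pvBuild : Nat → List String →
    PySem.Dict (List Char) Nat × PySem.Dict (List Char) Nat →
    PySem.Dict (List Char) Nat × PySem.Dict (List Char) Nat
  | _, [], ds => ds
  | i, f :: rest, (ex, pre) =>
    let nf := normalize_path f
    if PySem.Chars.endswith nf ['/'] then pvBuild (i + 1) rest (ex, pre.setdefault nf i)
    else pvBuild (i + 1) rest (ex.setdefault nf i, pre)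

-- body of Source B's inner 'for j in range(len(np))' loop
def pvScanStep (G : Nat → Option Nat) (guard : Nat → Bool) (best : Option Nat) (j : Nat) :
    Option Nat :=
  if guard j then
    match G j, best with
    | some k, none => some k
    | some k, some b => if k < b then some k else some b
    | none, b => b
  else best

-- Source B: best = exact.get(np); then scan the '/'-positions of np for prefix-dict hits
def pvScan (pre : PySem.Dict (List Char) Nat) (np : List Char) (best0 : Option Nat) :
    Option Nat :=
  (List.range np.length).foldl
    (pvScanStep (fun j => pre.get? (np.take (j + 1))) (fun j => np.getD j ' ' == '/')) best0

def find_violations_alt (changed_paths : List String) (forbidden_paths : List String) :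
    List String :=
  let ds := pvBuild 0 forbidden_paths (PySem.Dict.empty, PySem.Dict.empty)
  changed_paths.foldl (fun violations path =>
    let np := normalize_path path
    match pvScan ds.2 np (ds.1.get? np) with
    | some b => violations ++ [path ++ " matches " ++ forbidden_paths.getD b ""]
    | none => violations) []

-- ===== PRECONDITION & SPEC =====
def Spec_find_violations (changed_paths : List String) (forbidden_paths : List String) (out : List String) : Prop := out = find_violations_alt changed_paths forbidden_paths
instance (changed_paths : List String) (forbidden_paths : List String) (out : List String) : Decidable (Spec_find_violations changed_paths forbidden_paths out) := by unfold Spec_find_violations; infer_instance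

-- ===== CLAIM (what is proved, stated in full; the proofs are below) =====
def Claim_equal_find_violations : Prop := ∀ (changed_paths : List String) (forbidden_paths : List String), Dom_find_violations changed_paths forbidden_paths → Spec_find_violations changed_paths forbidden_paths (find_violations changed_paths forbidden_paths)

-- ===== LEMMAS AND PROOFS =====

-- first index ≥ i of an exact-type forbidden entry (normalized = key, no trailing '/')
def pvGE (key : List Char) : Nat → List String → Option Nat
  | _, [] => none
  | i, f :: l =>
    let nf := normalize_path f
    if PySem.Chars.endswith nf ['/'] then pvGE key (i + 1) l
    else if nf = key then some i else pvGE key (i + 1) l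
def pvGP (key : List Char) : Nat → List String → Option Nat
  | _, [] => none
  | i, f :: l =>
    let nf := normalize_path f
    if PySem.Chars.endswith nf ['/'] then
      if nf = key then some i else pvGP key (i + 1) l
    else pvGP key (i + 1) l
-- index form of A's inner loop
def pvFirst (path : String) : Nat → List String → Option Nat
  | _, [] => none
  | i, f :: l => if is_forbidden_path path f then some i else pvFirst path (i + 1) l
theorem pvGE_ge (key : List Char) : ∀ (l : List String) (i j : Nat),
    pvGE key i l = some j → i ≤ j := by
  intro l
  induction l with
  | nil => intro i j h; simp [pvGE] at h
  | cons f l ih =>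
    intro i j h
    simp only [pvGE] at h
    split at h
    · exact Nat.le_of_succ_le (ih (i + 1) j h)
    · split at h
      · simp only [Option.some.injEq] at h; omega
      · exact Nat.le_of_succ_le (ih (i + 1) j h)
theorem pvGP_ge (key : List Char) : ∀ (l : List String) (i j : Nat),
    pvGP key i l = some j → i ≤ j := by
  intro l
  induction l with
  | nil => intro i j h; simp [pvGP] at h
  | cons f l ih =>
    intro i j h
    simp only [pvGP] at h
    split at h
    · split at h
      · simp only [Option.some.injEq] at h; omega
      · exact Nat.le_of_succ_le (ih (i + 1) j h)
    · exact Nat.le_of_succ_le (ih (i + 1) j h)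

-- dict characterization of pvBuild: first-insertion-wins lookup
theorem pvBuild_get? : ∀ (l : List String) (i : Nat)
    (ex pre : PySem.Dict (List Char) Nat) (key : List Char),
    ((pvBuild i l (ex, pre)).1.get? key = ((ex.get? key).or (pvGE key i l))) ∧
    ((pvBuild i l (ex, pre)).2.get? key = ((pre.get? key).or (pvGP key i l))) := by
  intro l
  induction l with
  | nil => intro i ex pre key; simp [pvBuild, pvGE, pvGP]
  | cons f l ih =>
    intro i ex pre key
    simp only [pvBuild, pvGE, pvGP]
    cases he : PySem.Chars.endswith (normalize_path f) ['/'] with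
    | true =>
      simp only [if_true]
      refine ⟨(ih _ _ _ key).1, ?_⟩
      rw [(ih _ _ _ key).2]
      by_cases hk : normalize_path f = key
      · subst hk
        rw [PySem.Dict.get?_setdefault_self, if_pos rfl]
        cases pre.get? (normalize_path f) <;> simp
      · rw [PySem.Dict.get?_setdefault_of_ne _ _ (fun h => hk h.symm), if_neg hk]
    | false =>
      simp only [Bool.false_eq_true, if_false]
      refine ⟨?_, (ih _ _ _ key).2⟩
      rw [(ih _ _ _ key).1]
      by_cases hk : normalize_path f = key
      · subst hk
        rw [PySem.Dict.get?_setdefault_self, if_pos rfl]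
        cases ex.get? (normalize_path f) <;> simp
      · rw [PySem.Dict.get?_setdefault_of_ne _ _ (fun h => hk h.symm), if_neg hk]

-- A's inner loop returns the entry at the first matching index
theorem pvInnerA_eq (path : String) : ∀ (l : List String),
    pvInnerA path l = (pvFirst path 0 l).map (fun b => l.getD b "") := by
  have shift : ∀ (l : List String) (i : Nat),
      pvFirst path i l = (pvFirst path 0 l).map (· + i) := by
    intro l
    induction l with
    | nil => intro i; simp [pvFirst]
    | cons f l ih =>
      intro i
      simp only [pvFirst]
      by_cases h : is_forbidden_path path f = true
      · simp [h]
      · rw [if_neg h, if_neg h, ih (i + 1), ih 1, Option.map_map]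
        cases pvFirst path 0 l
        · simp
        · simp; omega
  intro l
  induction l with
  | nil => simp [pvInnerA, pvFirst]
  | cons f l ih =>
    simp only [pvInnerA, pvFirst]
    by_cases h : is_forbidden_path path f = true
    · simp [h]
    · rw [if_neg h, if_neg h, ih, shift l 1, Option.map_map]
      cases pvFirst path 0 l <;> simp

-- scan-step lemmas: the fold keeps the minimal index
theorem pvStep_bound (G : Nat → Option Nat) (guard : Nat → Bool) (i j : Nat) (b0 : Option Nat)
    (hb : ∀ k, b0 = some k → i ≤ k) (hG : ∀ k, G j = some k → i ≤ k) :
    ∀ k, pvScanStep G guard b0 j = some k → i ≤ k := by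
  intro k hk
  unfold pvScanStep at hk
  by_cases hg : guard j = true
  · rw [if_pos hg] at hk
    rcases hGj : G j with _ | m
    · rcases hb0 : b0 with _ | b
      · rw [hGj, hb0] at hk; simp at hk
      · rw [hGj, hb0] at hk; simp at hk; exact hk ▸ hb b hb0
    · rcases hb0 : b0 with _ | b
      · rw [hGj, hb0] at hk; simp at hk; exact hk ▸ hG m hGj
      · rw [hGj, hb0] at hk
        simp only [] at hk
        split at hk <;> simp at hk
        · exact hk ▸ hG m hGj
        · exact hk ▸ hb b hb0
  · rw [if_neg hg] at hk
    exact hb k hk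
theorem pvScan_keep (G : Nat → Option Nat) (guard : Nat → Bool) (i : Nat) :
    ∀ (js : List Nat), (∀ j ∈ js, ∀ k, G j = some k → i ≤ k) →
    js.foldl (pvScanStep G guard) (some i) = some i := by
  intro js
  induction js with
  | nil => intro _; simp
  | cons j js ih =>
    intro h
    have hstep : pvScanStep G guard (some i) j = some i := by
      unfold pvScanStep
      by_cases hg : guard j = true
      · rw [if_pos hg]
        rcases hGj : G j with _ | m
        · rfl
        · have : i ≤ m := h j (by simp) m hGj
          simp [Nat.not_lt.mpr this]
      · rw [if_neg hg]
    rw [List.foldl_cons, hstep]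
    exact ih (fun j hj => h j (by simp [hj]))
theorem pvScan_hit (G : Nat → Option Nat) (guard : Nat → Bool) (i : Nat) :
    ∀ (js : List Nat) (b0 : Option Nat), (∀ j ∈ js, ∀ k, G j = some k → i ≤ k) →
    (∀ k, b0 = some k → i ≤ k) →
    (∃ j0 ∈ js, guard j0 = true ∧ G j0 = some i) →
    js.foldl (pvScanStep G guard) b0 = some i := by
  intro js
  induction js with
  | nil => intro b0 _ _ hex; simp at hex
  | cons j js ih =>
    intro b0 h hb hex
    rw [List.foldl_cons]
    by_cases hj0 : guard j = true ∧ G j = some i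
    · have hstep : pvScanStep G guard b0 j = some i := by
        unfold pvScanStep
        rw [if_pos hj0.1, hj0.2]
        rcases hb0 : b0 with _ | b
        · rfl
        · have : i ≤ b := hb b hb0
          by_cases hlt : i < b
          · simp [hlt]
          · simp [hlt]; omega
      rw [hstep]
      exact pvScan_keep G guard i js (fun j hj => h j (by simp [hj]))
    · obtain ⟨j0, hj0mem, hg, hG⟩ := hex
      have hj0' : j0 ∈ js := by
        rcases List.mem_cons.mp hj0mem with h1 | h1
        · exact absurd ⟨h1 ▸ hg, h1 ▸ hG⟩ hj0
        · exact h1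
      exact ih _ (fun j hj => h j (by simp [hj]))
        (pvStep_bound G guard i j b0 hb (h j (by simp))) ⟨j0, hj0', hg, hG⟩

-- a trailing-'/' normalized forbidden path is a prefix of np iff it is a '/'-ancestor of np
theorem pvCand (np nf : List Char) (hE : PySem.Chars.endswith nf ['/'] = true)
    (hS : PySem.Chars.startswith np nf = true) :
    ∃ j, j < np.length ∧ (np.getD j ' ' == '/') = true ∧ np.take (j + 1) = nf := by
  have hpre : nf <+: np := (PySem.Chars.startswith_iff np nf).mp hS
  have hsuf : ['/'] <:+ nf := (PySem.Chars.endswith_iff nf ['/']).mp hE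
  obtain ⟨t, ht⟩ := hsuf
  have hne : nf ≠ [] := by rw [← ht]; simp
  have hlen : 1 ≤ nf.length := List.length_pos_iff.mpr hne
  have htake : np.take nf.length = nf := (List.prefix_iff_eq_take.mp hpre).symm
  have hlenle : nf.length ≤ np.length := hpre.length_le
  set n := nf.length with hnn
  refine ⟨n - 1, by omega, ?_, ?_⟩
  · have hnf1 : nf[n - 1]? = some '/' := by
      rw [← ht]
      have hlt : n - 1 = t.length := by rw [hnn, ← ht]; simp
      rw [hlt, List.getElem?_append_right (le_refl _)]
      simp
    have hnp1 : np[n - 1]? = some '/' := by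
      rw [← htake] at hnf1
      rw [List.getElem?_take] at hnf1
      split at hnf1
      · exact hnf1
      · omega
    simp [List.getD, hnp1]
  · have h1 : n - 1 + 1 = n := by omega
    rw [h1, htake]

-- core: B's per-path minimal matching index equals A's first matching index
theorem pvCore (path : String) : ∀ (l : List String) (i : Nat),
    (List.range (normalize_path path).length).foldl
      (pvScanStep (fun j => pvGP ((normalize_path path).take (j + 1)) i l)
        (fun j => (normalize_path path).getD j ' ' == '/'))
      (pvGE (normalize_path path) i l) = pvFirst path i l := by
  intro l
  induction l with
  | nil =>
    intro i
    simp only [pvGE, pvFirst]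
    have : ∀ (js : List Nat),
        js.foldl (pvScanStep (fun j => pvGP ((normalize_path path).take (j + 1)) i [])
          (fun j => (normalize_path path).getD j ' ' == '/')) none = none := by
      intro js
      induction js with
      | nil => rfl
      | cons j js ih => rw [List.foldl_cons]; simpa [pvScanStep, pvGP] using ih
    exact this _
  | cons f l ih =>
    intro i
    cases he : PySem.Chars.endswith (normalize_path f) ['/'] with
    | true =>
      cases hs : PySem.Chars.startswith (normalize_path path) (normalize_path f) with
      | true =>
        have hB : is_forbidden_path path f = true := by
          simp [is_forbidden_path, he, hs]
        simp only [pvFirst, hB, if_true]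
        have hGE : pvGE (normalize_path path) i (f :: l)
            = pvGE (normalize_path path) (i + 1) l := by simp [pvGE, he]
        rw [hGE]
        obtain ⟨j0, hj0len, hj0g, hj0t⟩ := pvCand _ _ he hs
        apply pvScan_hit
        · intro j hj k hk
          simp only [pvGP, he, if_true] at hk
          split at hk
          · simp only [Option.some.injEq] at hk; omega
          · exact Nat.le_of_succ_le (pvGP_ge _ _ _ _ hk)
        · intro k hk
          exact Nat.le_of_succ_le (pvGE_ge _ _ _ _ hk)
        · refine ⟨j0, List.mem_range.mpr hj0len, hj0g, ?_⟩
          simp [pvGP, he, hj0t]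
      | false =>
        have hB : is_forbidden_path path f = false := by
          simp [is_forbidden_path, he, hs]
        simp only [pvFirst, hB, Bool.false_eq_true, if_false]
        have hGE : pvGE (normalize_path path) i (f :: l)
            = pvGE (normalize_path path) (i + 1) l := by simp [pvGE, he]
        rw [hGE, ← ih (i + 1)]
        apply PySem.List.foldl_congr_mem
        intro acc j _
        have hne : ¬ (normalize_path f = (normalize_path path).take (j + 1)) := by
          intro h
          rw [(PySem.Chars.startswith_iff _ _).mpr (by rw [h]; exact List.take_prefix _ _)] at hs
          cases hs
        simp [pvScanStep, pvGP, he, hne]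
    | false =>
      by_cases hq : normalize_path f = normalize_path path
      · have hB : is_forbidden_path path f = true := by
          simp only [is_forbidden_path]
          rw [if_neg (by simp [he])]
          simp [hq]
        simp only [pvFirst, hB, if_true]
        have hGE : pvGE (normalize_path path) i (f :: l) = some i := by
          simp only [pvGE]
          rw [if_neg (by simp [he]), if_pos hq]
        rw [hGE]
        apply pvScan_keep
        intro j hj k hk
        simp only [pvGP] at hk
        rw [if_neg (by simp [he])] at hk
        exact Nat.le_of_succ_le (pvGP_ge _ _ _ _ hk)
      · have hB : is_forbidden_path path f = false := by
          simp [is_forbidden_path, he, Ne.symm hq]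
        simp only [pvFirst, hB, Bool.false_eq_true, if_false]
        have hGE : pvGE (normalize_path path) i (f :: l)
            = pvGE (normalize_path path) (i + 1) l := by simp [pvGE, he, hq]
        rw [hGE, ← ih (i + 1)]
        apply PySem.List.foldl_congr_mem
        intro acc j _
        simp [pvScanStep, pvGP, he]

-- per-path equality of the two branch decisions
theorem pvPath_eq (path : String) (forbidden_paths : List String) :
    (match pvScan (pvBuild 0 forbidden_paths (PySem.Dict.empty, PySem.Dict.empty)).2
        (normalize_path path)
        ((pvBuild 0 forbidden_paths (PySem.Dict.empty, PySem.Dict.empty)).1.get?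
          (normalize_path path)) with
      | some b => some (forbidden_paths.getD b "")
      | none => none) = pvInnerA path forbidden_paths := by
  have hex : (pvBuild 0 forbidden_paths (PySem.Dict.empty, PySem.Dict.empty)).1.get?
      (normalize_path path) = pvGE (normalize_path path) 0 forbidden_paths := by
    rw [(pvBuild_get? forbidden_paths 0 _ _ _).1]; simp
  have hpre : ∀ key, (pvBuild 0 forbidden_paths (PySem.Dict.empty, PySem.Dict.empty)).2.get? key
      = pvGP key 0 forbidden_paths := by
    intro key; rw [(pvBuild_get? forbidden_paths 0 _ _ key).2]; simp
  rw [pvInnerA_eq]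
  have hscan : pvScan (pvBuild 0 forbidden_paths (PySem.Dict.empty, PySem.Dict.empty)).2
      (normalize_path path)
      ((pvBuild 0 forbidden_paths (PySem.Dict.empty, PySem.Dict.empty)).1.get?
        (normalize_path path)) = pvFirst path 0 forbidden_paths := by
    rw [hex]
    unfold pvScan
    simp only [hpre]
    exact pvCore path forbidden_paths 0
  rw [hscan]
  cases pvFirst path 0 forbidden_paths <;> simp


-- ===== VERDICT (by name: the statement is the Claim_ definition above) =====
theorem find_violations_spec : Claim_equal_find_violations := by
  intro changed_paths forbidden_paths _
  unfold Spec_find_violations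
  simp only [find_violations, find_violations_alt]
  apply PySem.List.foldl_congr_mem
  intro acc path _
  rw [← pvPath_eq path forbidden_paths]
  cases pvScan (pvBuild 0 forbidden_paths (PySem.Dict.empty, PySem.Dict.empty)).2
      (normalize_path path)
      ((pvBuild 0 forbidden_paths (PySem.Dict.empty, PySem.Dict.empty)).1.get?
        (normalize_path path)) with
  | none => simp
  | some b => simp
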